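-- pv_equiv track=rewrite | github.com/neozenweb/codewars | haiku.py | is_haiku
-- ===== SOURCE A (Python) =====
-- def is_haiku(text):
--     data=[]
--     vowels=['a','e','i','o','u']
--     for num,line  in enumerate(text.splitlines()):
--               line = line.lower()
--               counter=0
--               for ind,varcomp in enumerate(list(line)):
--                   if ind >0 and varcomp in vowels and list(line)[ind-1] not in vowels:
--                       counter += 1
--
--                   if ind ==0 and varcomp in vowels:
--                       counter+=1
--
--                   if varcomp=='e' and ind < len(list(line))-1 and (list(line)[ind+1].isalpha()==False )and list(line)[ind-1] in ['l','k','y','m','c','g','d','r','s','p','b','f','n','j','t','v','w','x','z']: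
--                       counter -=1
--
--
--                   if varcomp=='e' and ind == len(list(line))-1 and list(line)[ind-1] not in vowels:
--                       counter -=1
--
--                   if varcomp=='y' and (ind > 0 and ind <len(list(line)) -1) and (list(line)[ind-1].isalpha()==True or list(line)[ind+1].isalpha()==False) and list(line)[ind-1] not in vowels and list(line)[ind+1] not in vowels:
--
--                       counter +=1
--
--                   if varcomp=="y" and ind==0 and list(line)[ind+1].isalpha()==False:
--                       counter+=1
--                   if varcomp=='y' and ind < len(list(line))-1 and (list(line)[ind+1] in vowels)and (list(line)[ind-1] in vowels):
--                       counter -=1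
--
--                   if varcomp=="y" and ind==len(list(line))-1 and list(line)[ind-1].isalpha()==True and list(line)[ind-1] not in vowels:
--                       counter+=1
--
--
--
--               data.append(counter)
--     for i in range(0,len(data),3):
--         if data[i:i+3]==[5,7,5]:
--             return True
--         else:
--             return False
-- ===== SOURCE B (Python) =====
-- VOWELS = 'aeiou'
-- SOFT = 'lkymcgdrspbfnjtvwxz'
--
--
-- def _clusters(line):
--     # base syllables = number of maximal vowel clusters: blank out every
--     # non-vowel and count the whitespace-separated groups that remain
--     return len(''.join(c if c in VOWELS else ' ' for c in line).split())
--
--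
-- def _corrections(line):
--     # second pass: the silent-e and y adjustments, from neighbours only
--     n = len(line)
--     adj = 0
--     for i, c in enumerate(line):
--         if c not in 'ey':
--             continue
--         prev = line[i - 1]  # cyclic at i == 0, as Python negative indexing does
--         if i == n - 1:      # last character of the line
--             if c == 'e':
--                 if prev not in VOWELS:
--                     adj -= 1
--             else:  # 'y'
--                 if prev.isalpha() and prev not in VOWELS:
--                     adj += 1
--         else:
--             nxt = line[i + 1]
--             if c == 'e':
--                 if not nxt.isalpha() and prev in SOFT:
--                     adj -= 1
--             else:  # 'y'
--                 if i == 0: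
--                     if not nxt.isalpha():
--                         adj += 1
--                 elif prev.isalpha() or not nxt.isalpha():
--                     if prev not in VOWELS and nxt not in VOWELS:
--                         adj += 1
--                 if nxt in VOWELS and prev in VOWELS:
--                     adj -= 1
--     return adj
--
--
-- def is_haiku(text):
--     counts = [_clusters(line) + _corrections(line)
--               for line in (raw.lower() for raw in text.splitlines())]
--     return counts[:3] == [5, 7, 5]
-- ===== Notes on version B (the rewrite author's own statement) =====
-- stated objective: faster
-- what changed: B computes each line's base syllable count as the number of maximal vowel clusters via a blank-out-and-split grouping pass, then adds a separate neighbour-inspecting e/y correction pass, in O(n) per line, instead of A's single indexed scan whose every branch rebuilds list(line) (O(n^2) per line); the 5-7-5 test becomes counts[:3] == [5,7,5].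
-- outside the precondition, e.g. on is_haiku(''): A returns None, B returns False; on is_haiku('y'): A raises IndexError, B returns False
import Mathlib
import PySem

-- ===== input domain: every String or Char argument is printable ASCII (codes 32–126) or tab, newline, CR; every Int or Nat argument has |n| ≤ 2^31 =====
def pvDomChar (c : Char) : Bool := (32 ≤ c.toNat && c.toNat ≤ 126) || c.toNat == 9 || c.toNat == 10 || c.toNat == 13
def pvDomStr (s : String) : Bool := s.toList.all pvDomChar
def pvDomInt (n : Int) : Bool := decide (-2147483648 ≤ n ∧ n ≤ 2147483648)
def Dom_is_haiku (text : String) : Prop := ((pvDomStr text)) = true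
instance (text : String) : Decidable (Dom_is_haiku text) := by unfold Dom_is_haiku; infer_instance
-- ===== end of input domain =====

-- B counts base syllables as maximal vowel clusters (blank-out-and-split) plus a separate
-- e/y correction pass, O(n) per line, instead of A's indexed scan that rebuilds list(line)
-- at each branch (O(n^2) per line).  Equivalence is about the RETURN value (A mutates nothing).

-- ===== PORT A =====
def pvVowels : List Char := ['a', 'e', 'i', 'o', 'u']
def pvSoft : List Char := ['l','k','y','m','c','g','d','r','s','p','b','f','n','j','t','v','w','x','z']

-- A's inner-loop body: the eight sequential `if`s updating `counter` (default ' ' stands for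
-- the one access list(line)[ind+1] that is out of range only on the line "y", outside Pre_).
def aStep (l : List Char) (counter : Int) (p : Int × Char) : Int :=
  let ind := p.1
  let c := p.2
  let counter := if ind > 0 && pvVowels.contains c
                    && !(pvVowels.contains (PySem.List.pyGetD l (ind - 1) ' ')) then counter + 1 else counter
  let counter := if ind == 0 && pvVowels.contains c then counter + 1 else counter
  let counter := if c == 'e' && decide (ind < (l.length : Int) - 1)
                    && (PySem.Chars.isalpha (PySem.List.pyGetD l (ind + 1) ' ') == false)
                    && pvSoft.contains (PySem.List.pyGetD l (ind - 1) ' ') then counter - 1 else counter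
  let counter := if c == 'e' && ind == (l.length : Int) - 1
                    && !(pvVowels.contains (PySem.List.pyGetD l (ind - 1) ' ')) then counter - 1 else counter
  let counter := if c == 'y' && (decide (ind > 0) && decide (ind < (l.length : Int) - 1))
                    && (PySem.Chars.isalpha (PySem.List.pyGetD l (ind - 1) ' ')
                        || PySem.Chars.isalpha (PySem.List.pyGetD l (ind + 1) ' ') == false)
                    && !(pvVowels.contains (PySem.List.pyGetD l (ind - 1) ' '))
                    && !(pvVowels.contains (PySem.List.pyGetD l (ind + 1) ' ')) then counter + 1 else counter
  let counter := if c == 'y' && ind == 0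
                    && PySem.Chars.isalpha (PySem.List.pyGetD l (ind + 1) ' ') == false then counter + 1 else counter
  let counter := if c == 'y' && decide (ind < (l.length : Int) - 1)
                    && pvVowels.contains (PySem.List.pyGetD l (ind + 1) ' ')
                    && pvVowels.contains (PySem.List.pyGetD l (ind - 1) ' ') then counter - 1 else counter
  let counter := if c == 'y' && ind == (l.length : Int) - 1
                    && PySem.Chars.isalpha (PySem.List.pyGetD l (ind - 1) ' ')
                    && !(pvVowels.contains (PySem.List.pyGetD l (ind - 1) ' ')) then counter + 1 else counter
  counter

def aLineCount (l : List Char) : Int :=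
  (PySem.List.enumerate l 0).foldl (aStep l) 0

def is_haiku (text : String) : Bool :=
  let data := (PySem.Str.splitlines text).foldl
    (fun d line => d ++ [aLineCount (PySem.Str.lower line).toList]) []
  -- for i in range(0, len(data), 3): both arms of the first iteration return.
  match PySem.List.pyRange 0 data.length 3 with
  | [] => false   -- Python returns None here (empty text); excluded by Pre_is_haiku
  | i :: _ => decide (PySem.List.slice data (some i) (some (i + 3)) = [5, 7, 5])

-- ===== PORT B =====
def pvBlank (c : Char) : Char := if pvVowels.contains c then c else ' '

-- base syllables: blank out every non-vowel, count the whitespace-separated groups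
def bClusters (l : List Char) : Int :=
  ((PySem.Chars.split₀ (l.map pvBlank)).length : Int)

-- second pass: the silent-e and y adjustments, from neighbours only
def bStep (l : List Char) (adj : Int) (p : Int × Char) : Int :=
  let i := p.1
  let c := p.2
  if !(c == 'e') && !(c == 'y') then adj
  else
    let prev := PySem.List.pyGetD l (i - 1) ' '   -- cyclic at i == 0, as Python's line[i-1]
    if i == (l.length : Int) - 1 then
      if c == 'e' then (if !(pvVowels.contains prev) then adj - 1 else adj)
      else (if PySem.Chars.isalpha prev && !(pvVowels.contains prev) then adj + 1 else adj)
    else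
      let nxt := PySem.List.pyGetD l (i + 1) ' '
      if c == 'e' then
        (if !(PySem.Chars.isalpha nxt) && pvSoft.contains prev then adj - 1 else adj)
      else
        let adj := if i == 0 then (if !(PySem.Chars.isalpha nxt) then adj + 1 else adj)
                   else if PySem.Chars.isalpha prev || !(PySem.Chars.isalpha nxt) then
                     (if !(pvVowels.contains prev) && !(pvVowels.contains nxt) then adj + 1 else adj)
                   else adj
        if pvVowels.contains nxt && pvVowels.contains prev then adj - 1 else adj

def bCorrections (l : List Char) : Int :=
  (PySem.List.enumerate l 0).foldl (bStep l) 0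

def is_haiku_alt (text : String) : Bool :=
  let counts := (PySem.Str.splitlines text).map
    (fun raw => bClusters (PySem.Str.lower raw).toList + bCorrections (PySem.Str.lower raw).toList)
  decide (PySem.List.slice counts none (some 3) = [5, 7, 5])

-- ===== PRECONDITION & SPEC =====
-- Pre_ excludes the empty text, where A returns None rather than a bool, and texts with a
-- line that lowercases to "y", where A raises IndexError (list index out of range).
def Pre_is_haiku (text : String) : Prop :=
  PySem.Str.splitlines text ≠ [] ∧
  ∀ l ∈ PySem.Str.splitlines text, PySem.Str.lower l ≠ "y"
instance (text : String) : Decidable (Pre_is_haiku text) := by unfold Pre_is_haiku; infer_instance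

def pvWitness_is_haiku : String := "old pond"

def Spec_is_haiku (text : String) (out : Bool) : Prop := out = is_haiku_alt text
instance (text : String) (out : Bool) : Decidable (Spec_is_haiku text out) := by unfold Spec_is_haiku; infer_instance

-- ===== CLAIM (what is proved, stated in full; the proofs are below) =====
def Claim_equal_is_haiku : Prop :=
  ∀ (text : String), Dom_is_haiku text → Pre_is_haiku text → Spec_is_haiku text (is_haiku text)

-- ===== LEMMAS AND PROOFS =====

-- the vowel-cluster-start indicator at position p of line l
def pvStart (l : List Char) (p : Int × Char) : Int :=
  if pvVowels.contains p.2 && (p.1 == 0 || !(pvVowels.contains (PySem.List.pyGetD l (p.1 - 1) ' '))) then 1 else 0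

-- structural cluster-start counter: pv = "previous char was a vowel"
def pvSc (l : List Char) (pv : Bool) : Nat :=
  match l with
  | [] => 0
  | c :: t => (if pvVowels.contains c && !pv then 1 else 0) + pvSc t (pvVowels.contains c)

lemma pvAddIf (c : Prop) [Decidable c] (z : Int) :
    (if c then z + 1 else z) = z + (if c then 1 else 0) := by split <;> ring

lemma pvSubIf (c : Prop) [Decidable c] (z : Int) :
    (if c then z - 1 else z) = z + (if c then -1 else 0) := by split <;> ring

lemma aStep_translate (l : List Char) (acc : Int) (p : Int × Char) :
    aStep l acc p = acc + aStep l 0 p := by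
  simp only [aStep, pvAddIf, pvSubIf]; ring

lemma bStep_translate (l : List Char) (acc : Int) (p : Int × Char) :
    bStep l acc p = acc + bStep l 0 p := by
  simp only [bStep, pvAddIf, pvSubIf]
  split_ifs <;> ring

lemma foldl_step_eq_sum (f : Int → Int × Char → Int)
    (hf : ∀ acc p, f acc p = acc + f 0 p) (e : List (Int × Char)) (a : Int) :
    e.foldl f a = a + (e.map (f 0)).sum := by
  induction e generalizing a with
  | nil => simp
  | cons p t ih => rw [List.foldl_cons, ih, hf, List.map_cons, List.sum_cons]; ring

def pvLastV (l : List Char) (pv : Bool) : Bool :=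
  match l.getLast? with
  | none => pv
  | some d => pvVowels.contains d

lemma isspace_blank (c : Char) : PySem.Chars.isspace (pvBlank c) = !(pvVowels.contains c) := by
  by_cases h : pvVowels.contains c = true
  · have hm : c ∈ pvVowels := by simpa using h
    rw [pvBlank, if_pos h, h]
    fin_cases hm <;> decide
  · rw [pvBlank, if_neg h]
    simp only [Bool.not_eq_true] at h
    rw [h]
    decide

lemma go_len (l : List Char) (cur : List Char) (acc : List (List Char)) :
    (PySem.Chars.split₀.go (l.map pvBlank) cur acc).length
      = acc.length + (if cur.isEmpty then 0 else 1) + pvSc l (!cur.isEmpty) := by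
  induction l generalizing cur acc with
  | nil =>
    simp only [List.map_nil, PySem.Chars.split₀.go]
    split_ifs <;> simp_all [pvSc]
  | cons c t ih =>
    simp only [List.map_cons, PySem.Chars.split₀.go, isspace_blank]
    by_cases hv : c ∈ pvVowels
    · have hv' : pvVowels.contains c = true := by simpa using hv
      simp only [hv', Bool.not_true, Bool.false_eq_true, if_false]
      rw [ih]
      simp only [pvSc, hv', List.isEmpty_cons, Bool.not_false, Bool.true_and]
      cases cur <;> simp [pvSc, hv, hv'] <;> omega
    · have hv' : pvVowels.contains c = false := by simpa using hv
      simp only [hv', Bool.not_false, if_true]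
      by_cases hc : cur.isEmpty
      · rw [if_pos hc, ih]
        simp [pvSc, hv, hv', hc]
      · rw [if_neg hc, ih]
        simp [pvSc, hv, hv', hc]

lemma pvSc_append (l : List Char) (c : Char) (pv : Bool) :
    pvSc (l ++ [c]) pv = pvSc l pv + (if pvVowels.contains c && !(pvLastV l pv) then 1 else 0) := by
  induction l generalizing pv with
  | nil => simp [pvSc, pvLastV]
  | cons d t ih =>
    simp only [List.cons_append, pvSc, ih]
    have : pvLastV (d :: t) pv = pvLastV t (pvVowels.contains d) := by
      cases t with
      | nil => simp [pvLastV]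
      | cons h r =>
        unfold pvLastV
        rw [List.getLast?_cons_cons]
        rcases hgl : (h :: r).getLast? with _ | e
        · simp at hgl
        · rfl
    rw [this]
    omega

lemma pvStart_append (l : List Char) (c : Char) (k : Nat) (hk : k < l.length) (x : Char) :
    pvStart (l ++ [c]) ((k : Int), x) = pvStart l ((k : Int), x) := by
  rcases Nat.eq_zero_or_pos k with h0 | h0
  · subst h0; simp [pvStart]
  · have hcast : (k : Int) - 1 = ((k - 1 : Nat) : Int) := by omega
    have hlt : k - 1 < l.length := by omega
    simp only [pvStart, hcast, PySem.List.pyGetD_natCast]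
    rw [List.getD_eq_getElem?_getD, List.getD_eq_getElem?_getD, List.getElem?_append_left hlt]

lemma sum_start (l : List Char) :
    ((PySem.List.enumerate l 0).map (pvStart l)).sum = (pvSc l false : Int) := by
  suffices h : ∀ (m : List Char),
      ((PySem.List.enumerate m 0).map (pvStart m)).sum = (pvSc m false : Int) from h l
  intro m
  induction m using List.reverseRecOn with
  | nil => simp [PySem.List.enumerate, pvSc]
  | append_singleton t c ih =>
    rw [PySem.List.enumerate_append]
    simp only [List.map_append, List.sum_append]
    have h1 : (PySem.List.enumerate t 0).map (pvStart (t ++ [c]))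
        = (PySem.List.enumerate t 0).map (pvStart t) := by
      apply List.map_congr_left
      intro p hp
      rcases (PySem.List.mem_enumerate_iff _ _ _).1 hp with ⟨k, hk, rfl⟩
      simpa using pvStart_append t c k hk _
    rw [h1, ih, pvSc_append]
    have h2 : pvStart (t ++ [c]) ((0 : Int) + (t.length : Int), c)
        = if pvVowels.contains c && !(pvLastV t false) then 1 else 0 := by
      rcases List.eq_nil_or_concat t with rfl | ⟨s, d, rfl⟩
      · simp [pvStart, pvLastV]
      · simp only [List.concat_eq_append]
        have hlen : (0 : Int) + (((s ++ [d]).length : Nat) : Int) - 1 = ((s.length : Nat) : Int) := by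
          simp
        have hd : ((s ++ [d]) ++ [c]).getD s.length ' ' = d := by
          rw [List.getD_eq_getElem?_getD, List.getElem?_append_left (by simp)]
          simp
        have hne : (((0:Int) + (((s ++ [d]).length : Nat) : Int)) == (0:Int)) = false := by
          simp
          omega
        simp only [pvStart, pvLastV, hlen, PySem.List.pyGetD_natCast, hd, hne,
          List.getLast?_concat, List.getLast?_append_cons]
        simp
    rw [PySem.List.enumerate_cons, PySem.List.enumerate_nil]
    simp only [List.map_cons, List.map_nil, List.sum_cons, List.sum_nil]
    rw [h2]
    push_cast
    ring

lemma pointwise (l : List Char) (hl : l ≠ ['y']) (k : Nat) (hk : k < l.length) :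
    aStep l 0 ((k : Int), l[k]) = pvStart l ((k : Int), l[k]) + bStep l 0 ((k : Int), l[k]) := by
  by_cases h0 : k = 0 <;> by_cases hlast : k + 1 < l.length
  · -- first, not last
    have e1 : (((k:Int)) == (0:Int)) = true := by simp [h0] 
    have e2 : (decide ((k:Int) > 0)) = false := by simp; omega
    have e3 : (decide ((k:Int) < (l.length:Int) - 1)) = true := by simp; omega
    have e4 : (((k:Int)) == ((l.length:Int) - 1)) = false := by simp; omega
    by_cases hce : l[k] = 'e'
    · have ce : ((l[k]) == 'e') = true := by simp [hce]
      have cy : ((l[k]) == 'y') = false := by rw [hce]; decide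
      have cv : pvVowels.contains (l[k]) = true := by rw [hce]; decide
      simp only [aStep, bStep, pvStart, e1, e2, e3, e4, ce, cy, cv, Bool.true_and, Bool.false_and, Bool.and_true, Bool.and_false, Bool.true_or, Bool.or_true, Bool.or_false, Bool.false_or, if_true, if_false, Bool.not_true, Bool.not_false, Bool.false_eq_true, Bool.true_eq_false, beq_false, beq_true]
      split_ifs <;> first | omega | (exfalso; simp_all)
    · by_cases hcy : l[k] = 'y'
      · have ce : ((l[k]) == 'e') = false := by simp [hce]
        have cy : ((l[k]) == 'y') = true := by simp [hcy]
        have cv : pvVowels.contains (l[k]) = false := by rw [hcy]; decide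
        simp only [aStep, bStep, pvStart, e1, e2, e3, e4, ce, cy, cv, Bool.true_and, Bool.false_and, Bool.and_true, Bool.and_false, Bool.true_or, Bool.or_true, Bool.or_false, Bool.false_or, if_true, if_false, Bool.not_true, Bool.not_false, Bool.false_eq_true, Bool.true_eq_false, beq_false, beq_true]
        split_ifs <;> first | omega | (exfalso; simp_all)
      · have ce : ((l[k]) == 'e') = false := by simp [hce]
        have cy : ((l[k]) == 'y') = false := by simp [hcy]
        simp only [aStep, bStep, pvStart, e1, e2, e3, e4, ce, cy, Bool.true_and, Bool.false_and, Bool.and_true, Bool.and_false, Bool.true_or, Bool.or_true, Bool.or_false, Bool.false_or, if_true, if_false, Bool.not_true, Bool.not_false, Bool.false_eq_true, Bool.true_eq_false, beq_false, beq_true]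
        split_ifs <;> first | omega | (exfalso; simp_all)
  · -- first and last (n = 1); the line "y" is excluded by hl
    have e1 : (((k:Int)) == (0:Int)) = true := by simp [h0] 
    have e2 : (decide ((k:Int) > 0)) = false := by simp; omega
    have e3 : (decide ((k:Int) < (l.length:Int) - 1)) = false := by simp; omega
    have e4 : (((k:Int)) == ((l.length:Int) - 1)) = true := by simp; omega
    by_cases hce : l[k] = 'e'
    · have ce : ((l[k]) == 'e') = true := by simp [hce]
      have cy : ((l[k]) == 'y') = false := by rw [hce]; decide
      have cv : pvVowels.contains (l[k]) = true := by rw [hce]; decide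
      simp only [aStep, bStep, pvStart, e1, e2, e3, e4, ce, cy, cv, Bool.true_and, Bool.false_and, Bool.and_true, Bool.and_false, Bool.true_or, Bool.or_true, Bool.or_false, Bool.false_or, if_true, if_false, Bool.not_true, Bool.not_false, Bool.false_eq_true, Bool.true_eq_false, beq_false, beq_true]
      split_ifs <;> first | omega | (exfalso; simp_all)
    · by_cases hcy : l[k] = 'y'
      · exfalso
        have hn : l.length = 1 := by omega
        rcases List.length_eq_one_iff.mp hn with ⟨a, rfl⟩
        simp [h0] at hcy
        exact hl (by rw [hcy])
      · have ce : ((l[k]) == 'e') = false := by simp [hce]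
        have cy : ((l[k]) == 'y') = false := by simp [hcy]
        simp only [aStep, bStep, pvStart, e1, e2, e3, e4, ce, cy, Bool.true_and, Bool.false_and, Bool.and_true, Bool.and_false, Bool.true_or, Bool.or_true, Bool.or_false, Bool.false_or, if_true, if_false, Bool.not_true, Bool.not_false, Bool.false_eq_true, Bool.true_eq_false, beq_false, beq_true]
        split_ifs <;> first | omega | (exfalso; simp_all)
  · -- middle
    have e1 : (((k:Int)) == (0:Int)) = false := by simp [h0]
    have e2 : (decide ((k:Int) > 0)) = true := by simp; omega
    have e3 : (decide ((k:Int) < (l.length:Int) - 1)) = true := by simp; omega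
    have e4 : (((k:Int)) == ((l.length:Int) - 1)) = false := by simp; omega
    by_cases hce : l[k] = 'e'
    · have ce : ((l[k]) == 'e') = true := by simp [hce]
      have cy : ((l[k]) == 'y') = false := by rw [hce]; decide
      have cv : pvVowels.contains (l[k]) = true := by rw [hce]; decide
      simp only [aStep, bStep, pvStart, e1, e2, e3, e4, ce, cy, cv, Bool.true_and, Bool.false_and, Bool.and_true, Bool.and_false, Bool.true_or, Bool.or_true, Bool.or_false, Bool.false_or, if_true, if_false, Bool.not_true, Bool.not_false, Bool.false_eq_true, Bool.true_eq_false, beq_false, beq_true]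
      split_ifs <;> first | omega | (exfalso; simp_all)
    · by_cases hcy : l[k] = 'y'
      · have ce : ((l[k]) == 'e') = false := by simp [hce]
        have cy : ((l[k]) == 'y') = true := by simp [hcy]
        have cv : pvVowels.contains (l[k]) = false := by rw [hcy]; decide
        simp only [aStep, bStep, pvStart, e1, e2, e3, e4, ce, cy, cv, Bool.true_and, Bool.false_and, Bool.and_true, Bool.and_false, Bool.true_or, Bool.or_true, Bool.or_false, Bool.false_or, if_true, if_false, Bool.not_true, Bool.not_false, Bool.false_eq_true, Bool.true_eq_false, beq_false, beq_true]
        split_ifs <;> first | omega | (exfalso; simp_all)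
      · have ce : ((l[k]) == 'e') = false := by simp [hce]
        have cy : ((l[k]) == 'y') = false := by simp [hcy]
        simp only [aStep, bStep, pvStart, e1, e2, e3, e4, ce, cy, Bool.true_and, Bool.false_and, Bool.and_true, Bool.and_false, Bool.true_or, Bool.or_true, Bool.or_false, Bool.false_or, if_true, if_false, Bool.not_true, Bool.not_false, Bool.false_eq_true, Bool.true_eq_false, beq_false, beq_true]
        split_ifs <;> first | omega | (exfalso; simp_all)
  · -- last, not first
    have e1 : (((k:Int)) == (0:Int)) = false := by simp [h0]
    have e2 : (decide ((k:Int) > 0)) = true := by simp; omega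
    have e3 : (decide ((k:Int) < (l.length:Int) - 1)) = false := by simp; omega
    have e4 : (((k:Int)) == ((l.length:Int) - 1)) = true := by simp; omega
    by_cases hce : l[k] = 'e'
    · have ce : ((l[k]) == 'e') = true := by simp [hce]
      have cy : ((l[k]) == 'y') = false := by rw [hce]; decide
      have cv : pvVowels.contains (l[k]) = true := by rw [hce]; decide
      simp only [aStep, bStep, pvStart, e1, e2, e3, e4, ce, cy, cv, Bool.true_and, Bool.false_and, Bool.and_true, Bool.and_false, Bool.true_or, Bool.or_true, Bool.or_false, Bool.false_or, if_true, if_false, Bool.not_true, Bool.not_false, Bool.false_eq_true, Bool.true_eq_false, beq_false, beq_true]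
      split_ifs <;> first | omega | (exfalso; simp_all)
    · by_cases hcy : l[k] = 'y'
      · have ce : ((l[k]) == 'e') = false := by simp [hce]
        have cy : ((l[k]) == 'y') = true := by simp [hcy]
        have cv : pvVowels.contains (l[k]) = false := by rw [hcy]; decide
        simp only [aStep, bStep, pvStart, e1, e2, e3, e4, ce, cy, cv, Bool.true_and, Bool.false_and, Bool.and_true, Bool.and_false, Bool.true_or, Bool.or_true, Bool.or_false, Bool.false_or, if_true, if_false, Bool.not_true, Bool.not_false, Bool.false_eq_true, Bool.true_eq_false, beq_false, beq_true]
        split_ifs <;> first | omega | (exfalso; simp_all)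
      · have ce : ((l[k]) == 'e') = false := by simp [hce]
        have cy : ((l[k]) == 'y') = false := by simp [hcy]
        simp only [aStep, bStep, pvStart, e1, e2, e3, e4, ce, cy, Bool.true_and, Bool.false_and, Bool.and_true, Bool.and_false, Bool.true_or, Bool.or_true, Bool.or_false, Bool.false_or, if_true, if_false, Bool.not_true, Bool.not_false, Bool.false_eq_true, Bool.true_eq_false, beq_false, beq_true]
        split_ifs <;> first | omega | (exfalso; simp_all)

lemma clusters_eq_sum (l : List Char) :
    bClusters l = ((PySem.List.enumerate l 0).map (pvStart l)).sum := by
  rw [sum_start]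
  unfold bClusters PySem.Chars.split₀
  rw [go_len]
  simp

lemma pyRange_three_head (n : Nat) (h : 0 < n) :
    ∃ rest, PySem.List.pyRange 0 (n : Int) 3 = 0 :: rest := by
  simp only [PySem.List.pyRange]
  norm_num
  have hpos : 0 < (((n : Int) + 3 - 1) / 3).toNat := by
    have : (1:Int) ≤ ((n : Int) + 3 - 1) / 3 := by
      rw [Int.le_ediv_iff_mul_le (by norm_num)]
      omega
    omega
  obtain ⟨m, hm⟩ : ∃ m, (((n : Int) + 3 - 1) / 3).toNat = m + 1 :=
    ⟨_, (Nat.succ_pred_eq_of_pos hpos).symm⟩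
  rw [hm, if_pos h, List.range_succ_eq_map]
  refine ⟨List.map ((fun k : Nat => (3:Int) * (k:Int)) ∘ Nat.succ) (List.range m), ?_⟩
  simp

lemma line_eq (l : List Char) (hl : l ≠ ['y']) :
    aLineCount l = bClusters l + bCorrections l := by
  unfold aLineCount bCorrections
  rw [foldl_step_eq_sum _ (aStep_translate l), foldl_step_eq_sum _ (bStep_translate l),
      clusters_eq_sum l]
  have hmap : (PySem.List.enumerate l 0).map (aStep l 0)
      = (PySem.List.enumerate l 0).map (fun p => pvStart l p + bStep l 0 p) := by
    apply List.map_congr_left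
    intro p hp
    rcases (PySem.List.mem_enumerate_iff _ _ _).1 hp with ⟨k, hk, rfl⟩
    simpa using pointwise l hl k hk
  rw [hmap]
  simp [List.sum_map_add]

-- ===== VERDICT (by name: the statement is the Claim_ definition above) =====
theorem is_haiku_spec : Claim_equal_is_haiku := by
  intro text _ hpre
  obtain ⟨hne, hy⟩ := hpre
  unfold Spec_is_haiku is_haiku is_haiku_alt
  rw [PySem.List.foldl_append_singleton_eq_map, List.nil_append]
  have hmap : (PySem.Str.splitlines text).map (fun line => aLineCount (PySem.Str.lower line).toList)
      = (PySem.Str.splitlines text).map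
        (fun raw => bClusters (PySem.Str.lower raw).toList + bCorrections (PySem.Str.lower raw).toList) := by
    apply List.map_congr_left
    intro line hline
    apply line_eq
    intro habs
    exact hy line hline (String.toList_inj.mp (by simp [habs]))
  rw [hmap]
  set counts := (PySem.Str.splitlines text).map
      (fun raw => bClusters (PySem.Str.lower raw).toList + bCorrections (PySem.Str.lower raw).toList) with hc
  have hlen : 0 < counts.length := by
    rw [hc, List.length_map]
    exact List.length_pos_iff.mpr hne
  obtain ⟨rest, hrange⟩ := pyRange_three_head counts.length hlen
  simp only [hrange]
  norm_num [PySem.List.slice_zero_start]
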